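-- pv_equiv track=rewrite | github.com/ankitkr8540/pylinguist-paper | pylinguist/models/stage1/base.py | _consume_string
-- ===== SOURCE A (Python) =====
-- from typing import Dict, List, Optional, Tuple
--
-- def _consume_string(code: str, start: int) -> Tuple[str, int]:
--     """Consume string literal."""
--     quote = code[start]
--     string = quote
--     i = start + 1
--     while i < len(code):
--         if code[i] == '\\' and i + 1 < len(code):
--             string += code[i:i+2]
--             i += 2
--             continue
--         string += code[i]
--         if code[i] == quote:
--             i += 1
--             break
--         i += 1
--     return string, i - start
-- ===== SOURCE B (Python) =====
-- def _consume_string(code, start):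
--     """Consume string literal by jumping between backslashes and quotes
--     with str.find instead of scanning one character at a time."""
--     quote = code[start]
--     n = len(code)
--     i = start + 1
--     while True:
--         nq = code.find(quote, i)
--         if nq == -1:
--             i = n
--             break
--         nb = code.find('\\', i)
--         if nb != -1 and nb <= nq and nb + 1 < n:
--             i = nb + 2
--             continue
--         i = nq + 1
--         break
--     return code[start:i], i - start
-- ===== Notes on version B (the rewrite author's own statement) =====
-- stated objective: alternative
-- what changed: B replaces A's per-character accumulator loop by computing only the end index, jumping between occurrences found by str.find (next quote / next backslash) and returning the slice code[start:i], instead of appending one character at a time.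
-- outside the precondition, e.g. on _consume_string('ab', -2): A returns ('aba', 3), B returns ('ab', 4); on _consume_string('ab', 5): A raises IndexError, B raises IndexError
import Mathlib
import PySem

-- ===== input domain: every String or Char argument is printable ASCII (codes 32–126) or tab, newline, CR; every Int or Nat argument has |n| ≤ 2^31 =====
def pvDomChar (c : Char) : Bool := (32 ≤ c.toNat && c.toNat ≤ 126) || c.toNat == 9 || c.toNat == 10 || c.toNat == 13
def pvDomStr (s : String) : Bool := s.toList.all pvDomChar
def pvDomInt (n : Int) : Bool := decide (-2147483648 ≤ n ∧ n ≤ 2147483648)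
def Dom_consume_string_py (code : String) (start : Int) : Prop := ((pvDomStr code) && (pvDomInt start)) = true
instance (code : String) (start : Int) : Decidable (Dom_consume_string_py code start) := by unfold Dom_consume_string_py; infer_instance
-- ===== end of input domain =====

-- B computes only the end index by jumping with str.find between the next quote/backslash and returns the slice code[start:i], instead of A's per-character scan that appends to an accumulator string; equivalence is proved for 0 <= start < len(code).


-- ===== PORT A =====
-- the while loop of A: state (string, i); branches in A's order
def goA (code : List Char) (quote : Char) (string : List Char) (i : Nat) : List Char × Nat :=
  if h : i < code.length then
    if h2 : code[i] = '\\' ∧ i + 1 < code.length then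
      -- string += code[i:i+2]; i += 2
      goA code quote (string ++ [code[i], code[i+1]'h2.2]) (i + 2)
    else if code[i] = quote then
      -- string += code[i]; i += 1; break
      (string ++ [code[i]], i + 1)
    else
      -- string += code[i]; i += 1
      goA code quote (string ++ [code[i]]) (i + 1)
  else (string, i)
termination_by code.length - i
decreasing_by all_goals omega

def consume_string_py (code : String) (start : Int) : String × Int :=
  match PySem.List.pyGet? code.toList start with
  | none => ("", 0)   -- Python raises IndexError here; such inputs are excluded by Pre_
  | some quote =>
      -- under Pre_ (0 ≤ start) the loop starts at i = start + 1 = start.toNat + 1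
      let r := goA code.toList quote [quote] (start.toNat + 1)
      (String.ofList r.1, (r.2 : Int) - start)

-- ===== PORT B =====
-- two facts about str.find needed by loopB's termination proof
theorem findFrom_past (cs sub : List Char) (i : Nat) (h : cs.length < i) :
    PySem.Chars.findFrom cs sub (i : Int) none = -1 := by
  simp only [PySem.Chars.findFrom]
  have h1 : ¬ ((i : Int) < 0) := by omega
  rw [if_neg h1, if_pos (by exact_mod_cast h)]

theorem findFrom_ge (cs sub : List Char) (i : Nat)
    (h : PySem.Chars.findFrom cs sub (i : Int) none ≠ -1) :
    (i : Int) ≤ PySem.Chars.findFrom cs sub (i : Int) none ∧ i ≤ cs.length := by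
  have hle : i ≤ cs.length := by
    by_contra hc
    exact h (findFrom_past cs sub i (by omega))
  exact ⟨(PySem.Chars.findFrom_natCast_spec cs sub i hle h).1, hle⟩

-- the while loop of B: only the end index i is computed; nq = code.find(quote, i), nb = code.find('\', i)
def loopB (code : List Char) (quote : Char) (i : Nat) : Nat :=
  if hq : PySem.Chars.findFrom code [quote] (i : Int) none = -1 then
    code.length
  else if hb : PySem.Chars.findFrom code ['\\'] (i : Int) none ≠ -1 ∧
      PySem.Chars.findFrom code ['\\'] (i : Int) none ≤ PySem.Chars.findFrom code [quote] (i : Int) none ∧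
      PySem.Chars.findFrom code ['\\'] (i : Int) none + 1 < (code.length : Int) then
    loopB code quote ((PySem.Chars.findFrom code ['\\'] (i : Int) none).toNat + 2)
  else
    (PySem.Chars.findFrom code [quote] (i : Int) none).toNat + 1
termination_by code.length - i
decreasing_by
  have h1 := findFrom_ge code ['\\'] i hb.1
  obtain ⟨-, -, h3⟩ := hb
  omega

def consume_string_py_alt (code : String) (start : Int) : String × Int :=
  match PySem.List.pyGet? code.toList start with
  | none => ("", 0)   -- Python raises IndexError here; such inputs are excluded by Pre_
  | some quote =>
      let i := loopB code.toList quote (start.toNat + 1)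
      (String.ofList (PySem.List.slice code.toList (some start) (some (i : Int))), (i : Int) - start)

-- ===== PRECONDITION & SPEC =====
-- Pre_ restricts to the natural domain 0 ≤ start < len(code): outside [-len, len) Python's code[start]
-- raises IndexError, and for in-range negative start A's value is an artefact of negative-index
-- wraparound for quote combined with a non-negative scan position i = start + 1 (see claim cites).
def Pre_consume_string_py (code : String) (start : Int) : Prop :=
  0 ≤ start ∧ start < (code.toList.length : Int)
instance (code : String) (start : Int) : Decidable (Pre_consume_string_py code start) := by
  unfold Pre_consume_string_py; infer_instance

def pvWitness_consume_string_py : String × Int := ("'ab'", 0)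

def Spec_consume_string_py (code : String) (start : Int) (out : String × Int) : Prop :=
  out = consume_string_py_alt code start
instance (code : String) (start : Int) (out : String × Int) : Decidable (Spec_consume_string_py code start out) := by
  unfold Spec_consume_string_py; infer_instance

-- ===== CLAIM (what is proved, stated in full; the proofs are below) =====
def Claim_equal_consume_string_py : Prop := ∀ (code : String) (start : Int), Dom_consume_string_py code start → Pre_consume_string_py code start → Spec_consume_string_py code start (consume_string_py code start)

-- ===== LEMMAS AND PROOFS =====

theorem singleton_prefix_iff_head? (c : Char) (l : List Char) : [c] <+: l ↔ l.head? = some c := by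
  cases l with
  | nil => simp
  | cons x t => simp [List.cons_prefix_cons, eq_comm]

theorem singleton_prefix_drop (cs : List Char) (c : Char) (m : Nat) :
    [c] <+: cs.drop m ↔ cs[m]? = some c := by
  rw [singleton_prefix_iff_head?, List.head?_drop]

-- findFrom for a single-character needle: the three step equations the induction uses
theorem ff_none_iff (cs : List Char) (c : Char) (k : Nat) (hk : k ≤ cs.length) :
    PySem.Chars.findFrom cs [c] (k : Int) none = -1 ↔ c ∉ cs.drop k := by
  rw [PySem.Chars.findFrom_natCast_eq_neg_one_iff cs [c] k hk, List.singleton_infix_iff]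

theorem ff_len (cs : List Char) (c : Char) :
    PySem.Chars.findFrom cs [c] (cs.length : Int) none = -1 := by
  rw [ff_none_iff cs c cs.length le_rfl]
  simp

theorem ff_self (cs : List Char) (c : Char) (k : Nat) (hk : k < cs.length) (h : cs[k] = c) :
    PySem.Chars.findFrom cs [c] (k : Int) none = (k : Int) := by
  have hdropk : cs.drop k = cs[k] :: cs.drop (k + 1) := (List.getElem_cons_drop hk).symm
  have hne : PySem.Chars.findFrom cs [c] (k : Int) none ≠ -1 := fun hc =>
    ((ff_none_iff cs c k (le_of_lt hk)).mp hc) (by rw [hdropk, ← h]; exact List.mem_cons_self)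
  obtain ⟨h1, h2, h3⟩ := PySem.Chars.findFrom_natCast_spec cs [c] k (le_of_lt hk) hne
  by_contra hne2
  have hlt : k < (PySem.Chars.findFrom cs [c] (k : Int) none).toNat := by omega
  exact h3 k le_rfl hlt (by rw [singleton_prefix_drop]; simp [hk, h])

theorem ff_step (cs : List Char) (c : Char) (k : Nat) (hk : k < cs.length) (h : cs[k] ≠ c) :
    PySem.Chars.findFrom cs [c] (k : Int) none =
    PySem.Chars.findFrom cs [c] ((k : Int) + 1) none := by
  have hk1 : ((k : Int) + 1) = ((k + 1 : Nat) : Int) := by push_cast; ring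
  rw [hk1]
  have hdrop : cs.drop k = cs[k] :: cs.drop (k + 1) := (List.getElem_cons_drop hk).symm
  by_cases h1 : PySem.Chars.findFrom cs [c] ((k + 1 : Nat) : Int) none = -1
  · rw [h1]
    have h1' := (ff_none_iff cs c (k+1) (by omega)).mp h1
    rw [ff_none_iff cs c k (le_of_lt hk), hdrop]
    simp only [List.mem_cons, not_or]
    exact ⟨fun hc => h hc.symm, h1'⟩
  · obtain ⟨g1, g2, g3⟩ := PySem.Chars.findFrom_natCast_spec cs [c] (k+1) (by omega) h1
    set j1 := PySem.Chars.findFrom cs [c] ((k + 1 : Nat) : Int) none with hj1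
    rw [singleton_prefix_drop] at g2
    have hj1n : j1.toNat < cs.length := by
      by_contra hc
      rw [List.getElem?_eq_none (by omega)] at g2; simp at g2
    have hne : PySem.Chars.findFrom cs [c] (k : Int) none ≠ -1 := by
      have hmem : c ∈ cs.drop k := by
        have : c ∈ cs.drop j1.toNat := by
          rw [← List.getElem_cons_drop hj1n]
          rw [List.getElem?_eq_getElem hj1n] at g2
          exact (Option.some_inj.mp g2) ▸ List.mem_cons_self
        have hkj : j1.toNat = k + (j1.toNat - k) := by omega
        rw [hkj, ← List.drop_drop] at this
        exact List.mem_of_mem_drop this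
      exact fun hc => ((ff_none_iff cs c k (le_of_lt hk)).mp hc) hmem
    obtain ⟨f1, f2, f3⟩ := PySem.Chars.findFrom_natCast_spec cs [c] k (le_of_lt hk) hne
    set j0 := PySem.Chars.findFrom cs [c] (k : Int) none with hj0
    rw [singleton_prefix_drop] at f2
    have hj0n : j0.toNat < cs.length := by
      by_contra hc
      rw [List.getElem?_eq_none (by omega)] at f2; simp at f2
    have hj0k : j0.toNat ≠ k := by
      intro hc
      rw [hc, List.getElem?_eq_getElem hk] at f2
      exact h (Option.some_inj.mp f2)
    -- j0 ≥ k+1, so minimality of j1 gives j1 ≤ j0; minimality of j0 gives j0 ≤ j1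
    have h10 : ¬ j0.toNat < j1.toNat := fun hc =>
      g3 j0.toNat (by omega) hc (by rw [singleton_prefix_drop]; exact f2)
    have h01 : ¬ j1.toNat < j0.toNat := fun hc =>
      f3 j1.toNat (by omega) hc (by rw [singleton_prefix_drop]; exact g2)
    omega

theorem ff_none_mono (cs : List Char) (c : Char) (k m : Nat) (hkm : k ≤ m) (hm : m ≤ cs.length)
    (h : PySem.Chars.findFrom cs [c] (k : Int) none = -1) :
    PySem.Chars.findFrom cs [c] (m : Int) none = -1 := by
  rw [ff_none_iff cs c m hm]
  rw [ff_none_iff cs c k (by omega)] at h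
  intro hc
  have : cs.drop m = (cs.drop k).drop (m - k) := by rw [List.drop_drop]; congr 1; omega
  exact h (List.mem_of_mem_drop (this ▸ hc))

-- bounds of B's loop
theorem loopB_bounds (cs : List Char) (q : Char) :
    ∀ fuel i, cs.length - i ≤ fuel → i ≤ cs.length →
      i ≤ loopB cs q i ∧ loopB cs q i ≤ cs.length := by
  intro fuel
  induction fuel with
  | zero =>
      intro i hf hi
      have hieq : i = cs.length := by omega
      rw [loopB, dif_pos (hieq ▸ ff_len cs q)]
      omega
  | succ m ih =>
      intro i hf hi
      rw [loopB]
      by_cases hq : PySem.Chars.findFrom cs [q] (i : Int) none = -1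
      · rw [dif_pos hq]; omega
      · rw [dif_neg hq]
        have hnq := findFrom_ge cs [q] i hq
        have hnqlt : PySem.Chars.findFrom cs [q] (i : Int) none < (cs.length : Int) := by
          obtain ⟨_, g2, _⟩ := PySem.Chars.findFrom_natCast_spec cs [q] i hi hq
          rw [singleton_prefix_drop] at g2
          by_contra hc
          rw [List.getElem?_eq_none (by omega)] at g2; simp at g2
        by_cases hb : PySem.Chars.findFrom cs ['\\'] (i : Int) none ≠ -1 ∧
            PySem.Chars.findFrom cs ['\\'] (i : Int) none ≤ PySem.Chars.findFrom cs [q] (i : Int) none ∧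
            PySem.Chars.findFrom cs ['\\'] (i : Int) none + 1 < (cs.length : Int)
        · rw [dif_pos hb]
          have hnb := findFrom_ge cs ['\\'] i hb.1
          have h2 := hb.2.2
          have := ih ((PySem.Chars.findFrom cs ['\\'] (i : Int) none).toNat + 2)
            (by omega) (by omega)
          omega
        · rw [dif_neg hb]; omega

-- one unfolding of loopB at an index where no quote remains
theorem loopB_none (cs : List Char) (q : Char) (i : Nat)
    (h : PySem.Chars.findFrom cs [q] (i : Int) none = -1) :
    loopB cs q i = cs.length := by
  rw [loopB, dif_pos h]

-- A's loop step i → i+1 over an ordinary character leaves B's result unchanged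
theorem loopB_skip (cs : List Char) (q : Char) (i : Nat) (hi : i < cs.length)
    (hq : cs[i] ≠ q) (hb : cs[i] ≠ '\\') :
    loopB cs q i = loopB cs q (i + 1) := by
  have e1 : ((i : Int) + 1) = ((i + 1 : Nat) : Int) := by push_cast; ring
  have hqe : PySem.Chars.findFrom cs [q] (i : Int) none =
      PySem.Chars.findFrom cs [q] ((i + 1 : Nat) : Int) none := by
    rw [ff_step cs q i hi hq, e1]
  have hbe : PySem.Chars.findFrom cs ['\\'] (i : Int) none =
      PySem.Chars.findFrom cs ['\\'] ((i + 1 : Nat) : Int) none := by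
    rw [ff_step cs '\\' i hi hb, e1]
  conv_lhs => rw [loopB]
  rw [hqe, hbe]
  conv_rhs => rw [loopB]

-- A's escape step i → i+2 leaves B's result unchanged
theorem loopB_escape (cs : List Char) (q : Char) (i : Nat) (hi : i < cs.length)
    (hb : cs[i] = '\\') (hi2 : i + 1 < cs.length) :
    loopB cs q i = loopB cs q (i + 2) := by
  have hnb : PySem.Chars.findFrom cs ['\\'] (i : Int) none = (i : Int) := ff_self cs '\\' i hi hb
  by_cases hq : PySem.Chars.findFrom cs [q] (i : Int) none = -1
  · rw [loopB_none cs q i hq,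
      loopB_none cs q (i + 2) (ff_none_mono cs q i (i + 2) (by omega) (by omega) hq)]
  · have hnq := findFrom_ge cs [q] i hq
    rw [loopB, dif_neg hq, dif_pos ⟨by rw [hnb]; omega, by rw [hnb]; omega,
      by rw [hnb]; omega⟩]
    congr 1
    rw [hnb]
    omega

-- A breaks at a closing quote exactly where B returns nq + 1
theorem loopB_close (cs : List Char) (q : Char) (i : Nat) (hi : i < cs.length)
    (hq : cs[i] = q) (hesc : ¬ (cs[i] = '\\' ∧ i + 1 < cs.length)) :
    loopB cs q i = i + 1 := by
  have hnq : PySem.Chars.findFrom cs [q] (i : Int) none = (i : Int) := ff_self cs q i hi hq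
  rw [loopB, dif_neg (by rw [hnq]; omega)]
  by_cases hbq : cs[i] = '\\'
  · -- quote is the backslash itself and it is the last character
    have hlast : i + 1 = cs.length := by
      rcases Nat.lt_or_ge (i + 1) cs.length with h | h
      · exact absurd ⟨hbq, h⟩ hesc
      · omega
    have hnb : PySem.Chars.findFrom cs ['\\'] (i : Int) none = (i : Int) := ff_self cs '\\' i hi hbq
    rw [dif_neg (by rw [hnb, hnq]; omega)]
    rw [hnq]; omega
  · -- no backslash at or before the quote position
    have hnotb : ¬ (PySem.Chars.findFrom cs ['\\'] (i : Int) none ≠ -1 ∧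
        PySem.Chars.findFrom cs ['\\'] (i : Int) none ≤ PySem.Chars.findFrom cs [q] (i : Int) none ∧
        PySem.Chars.findFrom cs ['\\'] (i : Int) none + 1 < (cs.length : Int)) := by
      rintro ⟨g1, g2, _⟩
      have e1 : ((i : Int) + 1) = ((i + 1 : Nat) : Int) := by push_cast; ring
      rw [ff_step cs '\\' i hi hbq, e1] at g1 g2
      have := (findFrom_ge cs ['\\'] (i + 1) g1).1
      rw [hnq] at g2
      push_cast at this g2
      omega
    rw [dif_neg hnotb, hnq]; omega

-- the main invariant: A's loop from i produces the slice up to B's end index, appended to its accumulator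
theorem goA_eq (cs : List Char) (q : Char) :
    ∀ fuel i s, cs.length - i ≤ fuel → i ≤ cs.length →
      goA cs q s i = (s ++ (cs.drop i).take (loopB cs q i - i), loopB cs q i) := by
  intro fuel
  induction fuel with
  | zero =>
      intro i s hf hi
      have hieq : i = cs.length := by omega
      rw [goA, dif_neg (by omega), loopB_none cs q i (hieq ▸ ff_len cs q)]
      simp [hieq]
  | succ m ih =>
      intro i s hf hi
      by_cases hin : i < cs.length
      · have hdrop : cs.drop i = cs[i] :: cs.drop (i + 1) := (List.getElem_cons_drop hin).symm
        rw [goA, dif_pos hin]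
        by_cases hesc : cs[i] = '\\' ∧ i + 1 < cs.length
        · -- escape: consume two characters
          rw [dif_pos hesc]
          have hL := loopB_escape cs q i hin hesc.1 hesc.2
          have hb2 := (loopB_bounds cs q (m + 1) (i + 2) (by omega) (by omega)).1
          rw [ih (i + 2) (s ++ [cs[i], cs[i+1]'hesc.2]) (by omega) (by omega), hL]
          have hdrop2 : cs.drop (i + 1) = cs[i+1]'hesc.2 :: cs.drop (i + 2) :=
            (List.getElem_cons_drop hesc.2).symm
          rw [hdrop, hdrop2]
          have htk : loopB cs q (i + 2) - i = (loopB cs q (i + 2) - (i + 2)) + 1 + 1 := by omega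
          rw [htk, List.take_succ_cons, List.take_succ_cons]
          simp
        · rw [dif_neg hesc]
          by_cases hcq : cs[i] = q
          · -- closing quote: break
            rw [if_pos hcq, loopB_close cs q i hin hcq hesc]
            have ht : i + 1 - i = 1 := by omega
            rw [ht, hdrop, List.take_succ_cons, List.take_zero]
          · -- ordinary character
            have hbq : cs[i] ≠ '\\' ∨ i + 1 = cs.length := by
              by_cases hb : cs[i] = '\\'
              · right; rcases Nat.lt_or_ge (i + 1) cs.length with h | h
                · exact absurd ⟨hb, h⟩ hesc
                · omega
              · left; exact hb
            have hL : loopB cs q i = loopB cs q (i + 1) := by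
              rcases hbq with hb | hlast
              · exact loopB_skip cs q i hin hcq hb
              · -- trailing lone backslash: both loops end at len
                have hq1 : PySem.Chars.findFrom cs [q] (i : Int) none = -1 := by
                  have e1 : ((i : Int) + 1) = ((i + 1 : Nat) : Int) := by push_cast; ring
                  rw [ff_step cs q i hin hcq, e1, hlast]
                  exact ff_len cs q
                rw [loopB_none cs q i hq1,
                  loopB_none cs q (i + 1) (ff_none_mono cs q i (i + 1) (by omega) (by omega) hq1)]
            rw [if_neg hcq, ih (i + 1) (s ++ [cs[i]]) (by omega) (by omega), ← hL]
            have hb1 := (loopB_bounds cs q (m + 1) (i + 1) (by omega) (by omega)).1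
            rw [hdrop]
            have htk : loopB cs q i - i = (loopB cs q i - (i + 1)) + 1 := by omega
            rw [htk, List.take_succ_cons]
            simp [hL]
      · have hieq : i = cs.length := by omega
        rw [goA, dif_neg (by omega), loopB_none cs q i (hieq ▸ ff_len cs q)]
        simp [hieq]

-- ===== VERDICT (by name: the statement is the Claim_ definition above) =====
theorem consume_string_py_spec : Claim_equal_consume_string_py := by
  intro code start _ hpre
  unfold Spec_consume_string_py consume_string_py consume_string_py_alt
  obtain ⟨h0, hlt⟩ := hpre
  set cs := code.toList with hcs
  have hs : start.toNat < cs.length := by omega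
  have hget : PySem.List.pyGet? cs start = some (cs[start.toNat]'hs) :=
    PySem.List.pyGet?_eq_some_getElem cs h0 (by omega)
  rw [hget]
  dsimp only
  set s := start.toNat with hsdef
  set q := cs[s]'hs with hq
  set L := loopB cs q (s + 1) with hL
  have hb := loopB_bounds cs q (cs.length) (s + 1) (by omega) (by omega)
  have hmain := goA_eq cs q cs.length (s + 1) [q] (by omega) (by omega)
  rw [hmain]
  rw [Prod.mk.injEq]
  have hslice : PySem.List.slice cs (some start) (some (L : Int)) =
      (cs.drop s).take (L - s) := by
    rw [PySem.List.slice_toNat cs h0 (by omega)]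
    simp
    rw [← hsdef]
  have hdrop : cs.drop s = q :: cs.drop (s + 1) := (List.getElem_cons_drop hs).symm
  have hlist : [q] ++ (cs.drop (s + 1)).take (L - (s + 1)) = (cs.drop s).take (L - s) := by
    rw [hdrop]
    have htk : L - s = (L - (s + 1)) + 1 := by omega
    rw [htk, List.take_succ_cons]
    simp
  constructor
  · rw [hslice, ← hlist]
  · push_cast; omega
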